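-- pv_equiv track=rewrite | github.com/MAIPA01/GLSL-Struct-Layout-Calculator | testCases.py | updateBaseOffsetArray
-- ===== SOURCE A (Python) =====
-- def updateBaseOffsetArray(bo: int, size: int, ba: int, num: int) -> int:
--     for _ in range(num):
--         if bo % ba != 0:
--             bo += ba - (bo % ba)
--         bo += size
--     if num > 0:
--         if bo % ba != 0:
--             bo += ba - (bo % ba)
--     return bo
-- ===== SOURCE B (Python) =====
-- def updateBaseOffsetArray(bo: int, size: int, ba: int, num: int) -> int:
--     # Closed form: each iteration aligns up to a multiple of ba then adds size,
--     # so after the first alignment every later padding equals the padding of size.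
--     if num <= 0:
--         return bo
--     return bo + (-bo) % ba + num * (size + (-size) % ba)
-- ===== Notes on version B (the rewrite author's own statement) =====
-- stated objective: faster
-- what changed: Replaces the O(num) align-and-add loop by an O(1) closed form: after the first alignment every iteration adds the same amount, so the result is bo + (-bo)%ba + num*(size + (-size)%ba) for num>0 and bo otherwise.
import Mathlib
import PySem

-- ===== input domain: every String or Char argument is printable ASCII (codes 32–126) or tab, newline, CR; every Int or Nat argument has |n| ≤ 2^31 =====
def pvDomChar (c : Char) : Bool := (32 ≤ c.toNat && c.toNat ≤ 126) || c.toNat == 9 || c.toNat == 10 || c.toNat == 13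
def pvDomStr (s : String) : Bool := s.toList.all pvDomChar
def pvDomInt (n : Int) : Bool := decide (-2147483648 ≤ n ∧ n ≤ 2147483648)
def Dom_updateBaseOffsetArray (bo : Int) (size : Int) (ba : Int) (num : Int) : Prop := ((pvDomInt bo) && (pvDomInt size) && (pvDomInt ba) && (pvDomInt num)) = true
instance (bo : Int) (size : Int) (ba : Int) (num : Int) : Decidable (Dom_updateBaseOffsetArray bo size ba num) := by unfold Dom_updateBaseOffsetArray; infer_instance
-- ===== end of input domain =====

-- B replaces A's O(num) align-and-add loop with an O(1) closed form; Pre_ excludes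
-- ba = 0 with num > 0, where both programs raise ZeroDivisionError.


-- ===== PORT A =====
-- literal port of A: loop over range(num), align bo up to a multiple of ba, add size;
-- after the loop, if num > 0, align once more
def updateBaseOffsetArray (bo : Int) (size : Int) (ba : Int) (num : Int) : Int :=
  let bo' := (PySem.List.pyRange 0 num 1).foldl
    (fun b _ => (if PySem.Int.mod b ba ≠ 0 then b + (ba - PySem.Int.mod b ba) else b) + size) bo
  if num > 0 then
    if PySem.Int.mod bo' ba ≠ 0 then bo' + (ba - PySem.Int.mod bo' ba) else bo'
  else bo'

-- ===== PORT B =====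
-- literal port of B: closed form, no loop
def updateBaseOffsetArray_alt (bo : Int) (size : Int) (ba : Int) (num : Int) : Int :=
  if num ≤ 0 then bo
  else bo + PySem.Int.mod (-bo) ba + num * (size + PySem.Int.mod (-size) ba)

-- ===== PRECONDITION & SPEC =====
-- Pre_ excludes exactly the inputs where A raises ZeroDivisionError: ba = 0 with num > 0
-- (when num ≤ 0 no '%' is evaluated and A returns bo).
def Pre_updateBaseOffsetArray (bo : Int) (size : Int) (ba : Int) (num : Int) : Prop :=
  ba ≠ 0 ∨ num ≤ 0
instance (bo : Int) (size : Int) (ba : Int) (num : Int) : Decidable (Pre_updateBaseOffsetArray bo size ba num) := by unfold Pre_updateBaseOffsetArray; infer_instance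
def pvWitness_updateBaseOffsetArray : Int × Int × Int × Int := (3, 7, 4, 5)

def Spec_updateBaseOffsetArray (bo : Int) (size : Int) (ba : Int) (num : Int) (out : Int) : Prop := out = updateBaseOffsetArray_alt bo size ba num
instance (bo : Int) (size : Int) (ba : Int) (num : Int) (out : Int) : Decidable (Spec_updateBaseOffsetArray bo size ba num out) := by unfold Spec_updateBaseOffsetArray; infer_instance

-- ===== CLAIM (what is proved, stated in full; the proofs are below) =====
def Claim_equal_updateBaseOffsetArray : Prop := ∀ (bo : Int) (size : Int) (ba : Int) (num : Int), Dom_updateBaseOffsetArray bo size ba num → Pre_updateBaseOffsetArray bo size ba num → Spec_updateBaseOffsetArray bo size ba num (updateBaseOffsetArray bo size ba num)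

-- ===== LEMMAS AND PROOFS =====

-- Python-mod uniqueness: if a = ba*q + r with r in the divisor-sign range, then a % ba = r.
theorem pyMod_unique (a r q ba : Int) (ha : a = ba * q + r)
    (h : (0 < ba ∧ 0 ≤ r ∧ r < ba) ∨ (ba < 0 ∧ ba < r ∧ r ≤ 0)) :
    PySem.Int.mod a ba = r := by
  have h1 := PySem.Int.floordiv_mul_add_mod a ba
  have hdvd : ba ∣ (PySem.Int.mod a ba - r) :=
    ⟨q - PySem.Int.floordiv a ba, by linear_combination h1 + ha⟩
  have hba : ba ≠ 0 := by rcases h with ⟨h, _⟩ | ⟨h, _⟩ <;> omega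
  have hb1 : (0 < ba ∧ 0 ≤ PySem.Int.mod a ba ∧ PySem.Int.mod a ba < ba) ∨
      (ba < 0 ∧ ba < PySem.Int.mod a ba ∧ PySem.Int.mod a ba ≤ 0) := by
    rcases lt_or_gt_of_ne hba with hb | hb
    · exact Or.inr ⟨hb, PySem.Int.mod_neg_bounds a hb⟩
    · exact Or.inl ⟨hb, PySem.Int.mod_nonneg a hb, PySem.Int.mod_lt a hb⟩
  have hz : PySem.Int.mod a ba - r = 0 :=
    Int.eq_zero_of_dvd_of_natAbs_lt_natAbs hdvd (by omega)
  omega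

-- 'pad ba x' is the amount A adds to align x up to a multiple of ba.
def pad (ba x : Int) : Int := PySem.Int.mod (-x) ba

-- the aligned branch of A equals adding pad
theorem align_eq_pad (ba x : Int) (hba : ba ≠ 0) :
    (if PySem.Int.mod x ba ≠ 0 then x + (ba - PySem.Int.mod x ba) else x) = x + pad ba x := by
  have h1 := PySem.Int.floordiv_mul_add_mod x ba
  by_cases hr : PySem.Int.mod x ba = 0
  · have hp : pad ba x = 0 := by
      apply pyMod_unique (-x) 0 (-(PySem.Int.floordiv x ba)) ba (by linear_combination h1 - hr)
      rcases lt_or_gt_of_ne hba with hb | hb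
      · exact Or.inr ⟨hb, by omega, le_refl 0⟩
      · exact Or.inl ⟨hb, le_refl 0, hb⟩
    simp [hr, pad] at hp ⊢
    omega
  · have hb1 : (0 < ba ∧ 0 ≤ PySem.Int.mod x ba ∧ PySem.Int.mod x ba < ba) ∨
        (ba < 0 ∧ ba < PySem.Int.mod x ba ∧ PySem.Int.mod x ba ≤ 0) := by
      rcases lt_or_gt_of_ne hba with hb | hb
      · exact Or.inr ⟨hb, PySem.Int.mod_neg_bounds x hb⟩
      · exact Or.inl ⟨hb, PySem.Int.mod_nonneg x hb, PySem.Int.mod_lt x hb⟩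
    have hp : pad ba x = ba - PySem.Int.mod x ba := by
      apply pyMod_unique (-x) (ba - PySem.Int.mod x ba) (-(PySem.Int.floordiv x ba) - 1) ba
        (by linear_combination h1)
      rcases hb1 with ⟨hb, hlo, hhi⟩ | ⟨hb, hlo, hhi⟩
      · exact Or.inl ⟨hb, by omega, by omega⟩
      · exact Or.inr ⟨hb, by omega, by omega⟩
    simp [hr, hp]

-- x + pad ba x is a multiple of ba
theorem dvd_add_pad (ba x : Int) : ba ∣ (x + pad ba x) := by
  have h1 := PySem.Int.floordiv_mul_add_mod (-x) ba
  exact ⟨-(PySem.Int.floordiv (-x) ba), by simp only [pad]; linear_combination h1⟩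

-- padding is invariant under adding a multiple of ba
theorem pad_add_multiple (ba m s : Int) (hba : ba ≠ 0) (hm : ba ∣ m) :
    pad ba (m + s) = pad ba s := by
  obtain ⟨c, hc⟩ := hm
  have h1 := PySem.Int.floordiv_mul_add_mod (-s) ba
  apply pyMod_unique (-(m + s)) (pad ba s) (PySem.Int.floordiv (-s) ba - c) ba
    (by simp only [pad]; linear_combination -hc - h1)
  rcases lt_or_gt_of_ne hba with hb | hb
  · exact Or.inr ⟨hb, PySem.Int.mod_neg_bounds (-s) hb⟩
  · exact Or.inl ⟨hb, PySem.Int.mod_nonneg (-s) hb, PySem.Int.mod_lt (-s) hb⟩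

-- one loop iteration of A
def step (ba size x : Int) : Int := x + pad ba x + size

-- a fold that ignores the list elements is an iterate of the step over the length
theorem foldl_const {α β : Type} (f : β → β) (l : List α) (b : β) :
    l.foldl (fun b _ => f b) b = f^[l.length] b := by
  induction l generalizing b with
  | nil => rfl
  | cons x xs ih => simp [List.foldl, ih, Function.iterate_succ_apply]

-- invariant: after n ≥ 1 iterations plus the final alignment the closed form holds
theorem iterate_step_pad (ba size bo : Int) (hba : ba ≠ 0) :
    ∀ n : Nat, 1 ≤ n →
      (step ba size)^[n] bo + pad ba ((step ba size)^[n] bo)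
        = bo + pad ba bo + n * (size + pad ba size) := by
  intro n hn
  induction n, hn using Nat.le_induction with
  | base =>
    rw [Function.iterate_one]
    have hp : pad ba (step ba size bo) = pad ba size := by
      show pad ba (bo + pad ba bo + size) = pad ba size
      exact pad_add_multiple ba (bo + pad ba bo) size hba (dvd_add_pad ba bo)
    rw [hp]
    show bo + pad ba bo + size + pad ba size = _
    push_cast; ring
  | succ n hn ih =>
    have hs : (step ba size)^[n + 1] bo
        = (step ba size)^[n] bo + pad ba ((step ba size)^[n] bo) + size := by
      rw [Function.iterate_succ_apply']; rfl
    have hp : pad ba ((step ba size)^[n + 1] bo) = pad ba size := by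
      rw [hs]
      exact pad_add_multiple ba _ size hba (dvd_add_pad ba _)
    rw [hp, hs]
    push_cast
    linear_combination ih

-- ===== VERDICT (by name: the statement is the Claim_ definition above) =====
theorem updateBaseOffsetArray_spec : Claim_equal_updateBaseOffsetArray := by
  intro bo size ba num _hdom hpre
  unfold Spec_updateBaseOffsetArray updateBaseOffsetArray updateBaseOffsetArray_alt
  by_cases hnum : num ≤ 0
  · have hnil : PySem.List.pyRange 0 num 1 = [] := PySem.List.pyRange_one_eq_nil (by omega)
    simp [hnil, hnum, show ¬ num > 0 from by omega]
  · have hba : ba ≠ 0 := by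
      rcases hpre with h | h
      · exact h
      · exact absurd h hnum
    have hpos : 0 < num := by omega
    have hbody : (fun (b : Int) (_ : Int) =>
        (if PySem.Int.mod b ba ≠ 0 then b + (ba - PySem.Int.mod b ba) else b) + size)
        = fun (b : Int) (_ : Int) => step ba size b := by
      funext b c
      rw [align_eq_pad ba b hba]
      rfl
    have hfold : (PySem.List.pyRange 0 num 1).foldl
        (fun b _ => (if PySem.Int.mod b ba ≠ 0 then b + (ba - PySem.Int.mod b ba) else b) + size)
        bo = (step ba size)^[num.toNat] bo := by
      rw [hbody, foldl_const, PySem.List.length_pyRange_one]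
      congr 1
      omega
    simp only [hfold, if_pos hpos, if_neg hnum]
    rw [align_eq_pad ba _ hba, iterate_step_pad ba size bo hba num.toNat (by omega)]
    rw [show ((num.toNat : Int)) = num from by omega]
    simp only [pad]
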